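-- pv_equiv track=rewrite | github.com/kochersg/toms_problem | src/toms_problem/analytic_solution.py | sort_combinations_to_number_of_searches
-- ===== SOURCE A (Python) =====
-- def get_combi_length(combi: list[int]) -> int:
--     l = 0
--     for c in combi:
--         if c != 0:
--             l += 1
--     return l
--
-- def sort_combinations_to_number_of_searches(combinations: list[int]):
--     res = {}
--     for c in combinations:
--         combi_len = get_combi_length(combi=c)
--         if combi_len in res.keys():
--             res[combi_len].append(c)
--         else:
--             res[combi_len]=[c]
--     return res
-- ===== SOURCE B (Python) =====
-- def sort_combinations_to_number_of_searches(combinations):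
--     keys = [len([x for x in c if x != 0]) for c in combinations]
--     return {k: [c for c, kk in zip(combinations, keys) if kk == k]
--             for k in dict.fromkeys(keys)}
-- ===== Notes on version B (the rewrite author's own statement) =====
-- stated objective: alternative
-- what changed: B precomputes all nonzero-count keys in one pass (len of a filter instead of a counting loop), dedups them with dict.fromkeys, and builds each group by a per-key filter over zip(combinations, keys), replacing A's incremental dict-membership-and-append loop.
import Mathlib
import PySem

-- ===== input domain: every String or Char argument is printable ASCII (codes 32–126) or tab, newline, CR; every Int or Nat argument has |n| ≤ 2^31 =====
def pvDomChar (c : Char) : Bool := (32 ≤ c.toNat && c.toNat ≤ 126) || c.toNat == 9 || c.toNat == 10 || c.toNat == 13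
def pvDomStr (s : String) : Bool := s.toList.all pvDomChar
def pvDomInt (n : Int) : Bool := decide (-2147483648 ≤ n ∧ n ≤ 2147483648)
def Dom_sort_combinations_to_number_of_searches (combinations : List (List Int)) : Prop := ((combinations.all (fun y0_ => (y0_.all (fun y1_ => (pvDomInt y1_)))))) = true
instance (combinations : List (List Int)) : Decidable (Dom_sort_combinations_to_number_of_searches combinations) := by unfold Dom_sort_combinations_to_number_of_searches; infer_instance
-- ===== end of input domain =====

-- B replaces A's incremental membership-and-append dict loop by precomputed keys, an ordered dedup, and a per-key filter pass (alternative decomposition, similar cost).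


-- ===== PORT A =====
def get_combi_length (combi : List Int) : Int :=
  combi.foldl (fun l c => if c ≠ 0 then l + 1 else l) 0

def sort_combinations_to_number_of_searches (combinations : List (List Int)) : List (Int × List (List Int)) :=
  (combinations.foldl (fun res c =>
      let combi_len := get_combi_length c
      if res.contains combi_len then
        res.modify combi_len [] (fun l => l ++ [c])
      else
        res.insert combi_len [c])
    (PySem.Dict.empty : PySem.Dict Int (List (List Int)))).items

-- ===== PORT B =====
def pvB_count (c : List Int) : Int :=
  ((c.filter (fun x => x != 0)).length : Int)

def sort_combinations_to_number_of_searches_alt (combinations : List (List Int)) : List (Int × List (List Int)) :=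
  let keys := combinations.map pvB_count
  (PySem.List.dedup keys).map (fun k =>
    (k, ((combinations.zip keys).filter (fun p => p.2 == k)).map (fun p => p.1)))

-- ===== PRECONDITION & SPEC =====
def Spec_sort_combinations_to_number_of_searches (combinations : List (List Int)) (out : List (Int × List (List Int))) : Prop := out = sort_combinations_to_number_of_searches_alt combinations
instance (combinations : List (List Int)) (out : List (Int × List (List Int))) : Decidable (Spec_sort_combinations_to_number_of_searches combinations out) := by unfold Spec_sort_combinations_to_number_of_searches; infer_instance

-- ===== CLAIM (what is proved, stated in full; the proofs are below) =====
def Claim_equal_sort_combinations_to_number_of_searches : Prop := ∀ (combinations : List (List Int)), Dom_sort_combinations_to_number_of_searches combinations → Spec_sort_combinations_to_number_of_searches combinations (sort_combinations_to_number_of_searches combinations)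

-- ===== LEMMAS AND PROOFS =====

-- the two nonzero-counting helpers agree
theorem count_eq (c : List Int) : get_combi_length c = pvB_count c := by
  unfold get_combi_length pvB_count
  rw [show (fun (l : Int) (c : Int) => if c ≠ 0 then l + 1 else l)
        = (fun (acc : Int) (x : Int) => if (x != 0) = true then acc + 1 else acc) by
      funext l c; by_cases h : c = 0 <;> simp [h]]
  rw [PySem.List.foldl_count_if (fun x => x != 0) c 0]
  simp [List.countP_eq_length_filter]

-- A's loop body is the unconditional modify step
theorem stepA_eq_modify (d : PySem.Dict Int (List (List Int))) (c : List Int) :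
    (let combi_len := get_combi_length c
     if d.contains combi_len then d.modify combi_len [] (fun l => l ++ [c])
     else d.insert combi_len [c])
    = d.modify (get_combi_length c) [] (fun l => l ++ [c]) := by
  by_cases h : d.contains (get_combi_length c)
  · simp [h]
  · simp only [h, Bool.false_eq_true, if_false, PySem.Dict.modify]
    rw [PySem.Dict.getD_of_not_contains _ _ (by simpa using h)]
    simp

-- a dict with distinct keys is the map of getD over its keys
theorem items_eq_map_keys (d : PySem.Dict Int (List (List Int))) (h : d.keys.Nodup) :
    d.items = d.keys.map (fun k => (k, d.getD k [])) := by
  have hk : d.keys = d.items.map (fun p => p.1) := by simp [PySem.Dict.keys]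
  rw [hk, List.map_map]
  symm
  calc d.items.map ((fun k => (k, d.getD k [])) ∘ (fun p => p.1))
      = d.items.map (fun p => p) := by
        apply List.map_congr_left
        intro p hp
        have : d.getD p.1 [] = p.2 :=
          PySem.Dict.getD_of_mem_items d (by simpa using hp) h []
        simp [this]
    _ = d.items := by simp

theorem sort_combinations_to_number_of_searches_eq_alt (combinations : List (List Int)) :
    sort_combinations_to_number_of_searches combinations
      = sort_combinations_to_number_of_searches_alt combinations := by
  unfold sort_combinations_to_number_of_searches
  -- replace A's branching step by the modify step
  rw [show (fun (res : PySem.Dict Int (List (List Int))) (c : List Int) =>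
        let combi_len := get_combi_length c
        if res.contains combi_len then res.modify combi_len [] (fun l => l ++ [c])
        else res.insert combi_len [c])
      = (fun (res : PySem.Dict Int (List (List Int))) (c : List Int) =>
          res.modify (get_combi_length c) [] (fun l => l ++ [c])) by
    funext d c; exact stepA_eq_modify d c]
  set F := combinations.foldl
      (fun (res : PySem.Dict Int (List (List Int))) (c : List Int) =>
        res.modify (get_combi_length c) [] (fun l => l ++ [c]))
      PySem.Dict.empty with hF
  have hnodup : F.keys.Nodup := by
    rw [hF]
    exact PySem.Dict.nodup_keys_foldl_modify_key combinations get_combi_length []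
      (fun _ c => fun l => l ++ [c]) PySem.Dict.empty (by simp)
  have hkeys : F.keys = PySem.List.dedup (combinations.map pvB_count) := by
    rw [hF, PySem.Dict.keys_foldl_modify_key combinations get_combi_length []
      (fun _ c => fun l => l ++ [c]) PySem.Dict.empty]
    have : combinations.map get_combi_length = combinations.map pvB_count :=
      List.map_congr_left (fun c _ => count_eq c)
    rw [this]
    simp [PySem.Dict.keys_empty, PySem.Set.update, PySem.List.dedup_eq_ofList,
      PySem.Set.ofList_eq_foldl]
  have hgetD : ∀ k : Int, F.getD k []
      = ((combinations.zip (combinations.map pvB_count)).filter (fun p => p.2 == k)).map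
          (fun p => p.1) := by
    intro k
    have hfold : F = (combinations.map (fun c => (get_combi_length c, c))).foldl
        (fun d p => d.modify p.1 [] (fun l => l ++ [p.2])) PySem.Dict.empty := by
      rw [hF, List.foldl_map]
    rw [hfold, PySem.Dict.getD_foldl_modify_append]
    rw [List.filter_map, List.map_map]
    have hz : combinations.zip (combinations.map pvB_count)
        = combinations.map (fun c => (c, pvB_count c)) := by
      simpa using @List.zip_map' _ _ _ id pvB_count combinations
    rw [hz, List.filter_map, List.map_map]
    simp only [PySem.Dict.getD_empty, List.nil_append, Function.comp_def]
    congr 1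
    exact List.filter_congr (fun c _ => by rw [count_eq])
  rw [items_eq_map_keys F hnodup, hkeys]
  unfold sort_combinations_to_number_of_searches_alt
  apply List.map_congr_left
  intro k _
  rw [hgetD k]

-- ===== VERDICT (by name: the statement is the Claim_ definition above) =====
theorem sort_combinations_to_number_of_searches_spec : Claim_equal_sort_combinations_to_number_of_searches := by
  intro combinations _
  unfold Spec_sort_combinations_to_number_of_searches
  exact sort_combinations_to_number_of_searches_eq_alt combinations
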